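-- pv_equiv track=rewrite | github.com/openqt/algorithms | leetcode/python/ac/lc036-valid-sudoku.py | _check
-- ===== SOURCE A (Python) =====
-- def _check(cells):
--     cache = set()
--     for i in cells:
--         if i == '.':
--             continue
--         if i in cache:
--             return False
--         else:
--             cache.add(i)
--     return True
-- ===== SOURCE B (Python) =====
-- def _check(cells):
--     s = sorted(c for c in cells if c != '.')
--     return all(a != b for a, b in zip(s, s[1:]))
-- ===== Notes on version B (the rewrite author's own statement) =====
-- stated objective: alternative
-- what changed: Replaces the hash-set membership loop with a sort-then-scan: sort the non-dot cells and check that no two adjacent sorted cells are equal (duplicates are adjacent after sorting).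
import Mathlib
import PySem

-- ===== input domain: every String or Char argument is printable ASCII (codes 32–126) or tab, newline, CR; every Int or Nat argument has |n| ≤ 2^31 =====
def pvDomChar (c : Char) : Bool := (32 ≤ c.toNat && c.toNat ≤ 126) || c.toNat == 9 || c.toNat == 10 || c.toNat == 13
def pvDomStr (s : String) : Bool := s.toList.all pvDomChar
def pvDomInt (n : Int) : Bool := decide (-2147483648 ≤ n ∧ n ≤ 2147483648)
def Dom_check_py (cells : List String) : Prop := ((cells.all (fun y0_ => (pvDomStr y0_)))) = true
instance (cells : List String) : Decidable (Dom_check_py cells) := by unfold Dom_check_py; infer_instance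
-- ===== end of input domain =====

-- B replaces A's hash-set membership loop by sort-then-adjacent-scan (objective: alternative).

-- ===== PORT A =====
-- the for-loop with its 'cache' set and early return False
def checkLoopA : List String → PySem.Set String → Bool
  | [], _ => true
  | i :: rest, cache =>
    if i = "." then checkLoopA rest cache
    else if PySem.Set.contains cache i then false
    else checkLoopA rest (PySem.Set.add cache i)

def check_py (cells : List String) : Bool := checkLoopA cells PySem.Set.empty

-- ===== PORT B =====
def check_py_alt (cells : List String) : Bool :=
  let s := PySem.List.sorted (cells.filter (fun c => c ≠ ".")) (fun x => x) false
  (s.zip (PySem.List.slice s (some 1) none)).all (fun p => p.1 != p.2)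

-- ===== PRECONDITION & SPEC =====
def Spec_check_py (cells : List String) (out : Bool) : Prop := out = check_py_alt cells
instance (cells : List String) (out : Bool) : Decidable (Spec_check_py cells out) := by unfold Spec_check_py; infer_instance

-- ===== CLAIM (what is proved, stated in full; the proofs are below) =====
def Claim_equal_check_py : Prop := ∀ (cells : List String), Dom_check_py cells → Spec_check_py cells (check_py cells)

-- ===== LEMMAS AND PROOFS =====

-- A's loop returns true iff the non-dot cells are distinct and none is already cached
lemma checkLoopA_char (cells : List String) : ∀ (cache : PySem.Set String),
    (checkLoopA cells cache = true ↔
      (cells.filter (fun c => c ≠ ".")).Nodup ∧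
        ∀ x ∈ cells.filter (fun c => c ≠ "."), x ∉ cache) := by
  induction cells with
  | nil => intro cache; simp [checkLoopA]
  | cons i rest ih =>
    intro cache
    by_cases hdot : i = "."
    · simpa [checkLoopA, hdot] using ih cache
    · by_cases hmem : i ∈ cache
      · simp [checkLoopA, hdot, PySem.Set.contains, hmem]
      · have hc : PySem.Set.contains cache i = false := by
          simp [PySem.Set.contains, hmem]
        simp only [checkLoopA, if_neg hdot, hc, Bool.false_eq_true, if_false,
          List.filter_cons, decide_eq_true_eq]
        rw [ih]
        simp [PySem.Set.add, PySem.Set.contains, hmem, hdot, List.nodup_cons]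
        constructor
        · rintro ⟨hnd, hall⟩
          exact ⟨⟨fun hi => (hall i hi hdot).2 rfl, hnd⟩, fun a ha had => (hall a ha had).1⟩
        · rintro ⟨⟨hni, hnd⟩, hall⟩
          exact ⟨hnd, fun x hx hxd => ⟨hall x hx hxd, fun he => hni (he ▸ hx)⟩⟩

-- the adjacent-pair scan (zip s s[1:]) computes Chain' (· ≠ ·)
lemma zip_tail_all_ne (s : List String) :
    ((s.zip s.tail).all (fun p => p.1 != p.2) = true ↔ List.IsChain (fun a b => a ≠ b) s) := by
  induction s with
  | nil => simp [List.isChain_nil]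
  | cons a t ih =>
    cases t with
    | nil => simp [List.isChain_singleton]
    | cons b u =>
      simp only [List.tail_cons, List.zip_cons_cons, List.all_cons, Bool.and_eq_true,
        bne_iff_ne, List.isChain_cons_cons]
      rw [← ih]
      simp

-- an ≤-sorted list with no equal adjacent pair is Nodup, and conversely
lemma sorted_chain_ne_iff_nodup (s : List String)
    (hs : s.Pairwise (fun a b => a ≤ b)) :
    (List.IsChain (fun a b => a ≠ b) s ↔ s.Nodup) := by
  constructor
  · intro hch
    have hle : List.IsChain (fun a b : String => a ≤ b) s := hs.isChain
    have hlt : List.IsChain (fun a b : String => a < b) s := by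
      clear hs
      induction s with
      | nil => exact List.isChain_nil
      | cons a t ih =>
        cases t with
        | nil => exact List.isChain_singleton a
        | cons b u =>
          rw [List.isChain_cons_cons] at hch hle ⊢
          exact ⟨lt_of_le_of_ne hle.1 hch.1, ih hch.2 hle.2⟩
    have hp : s.Pairwise (fun a b : String => a < b) :=
      (List.isChain_iff_pairwise).mp hlt
    exact hp.imp (fun h => ne_of_lt h)
  · intro hnd
    exact hnd.isChain

-- ===== VERDICT (by name: the statement is the Claim_ definition above) =====
theorem check_py_spec : Claim_equal_check_py := by
  intro cells _
  unfold Spec_check_py check_py check_py_alt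
  rw [Bool.eq_iff_iff]
  rw [checkLoopA_char]
  simp only [PySem.List.slice_from_one]
  rw [zip_tail_all_ne]
  rw [sorted_chain_ne_iff_nodup _
    (by simpa using PySem.List.sorted_pairwise (cells.filter (fun c => c ≠ ".")) (fun x => x))]
  have hperm : (PySem.List.sorted (cells.filter (fun c => c ≠ ".")) (fun x => x) false).Perm
      (cells.filter (fun c => c ≠ ".")) := PySem.List.sorted_perm _ _ _
  constructor
  · intro ⟨hnd, _⟩; exact (hperm.nodup_iff).mpr hnd
  · intro hnd; exact ⟨(hperm.nodup_iff).mp hnd, by simp [PySem.Set.empty]⟩
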